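-- pv_equiv track=rewrite | github.com/GeorgeKologermanskiy/dataviz-task2 | graham_coffman.py | compare_sets
-- ===== SOURCE A (Python) =====
-- def compare_sets(A, B):
--     for a, b in zip(reversed(sorted(A)), reversed(sorted(B))):
--         if a < b:
--             return -1
--         if b < a:
--             return 1
--     if len(A) < len(B):
--         return -1
--     if len(B) < len(A):
--         return 1
--     return 0
-- ===== SOURCE B (Python) =====
-- def compare_sets(A, B):
--     for v in sorted(set(A) | set(B), reverse=True):
--         ca = A.count(v)
--         cb = B.count(v)
--         if ca > cb:
--             return 1
--         if cb > ca:
--             return -1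
--     return 0
-- ===== Notes on version B (the rewrite author's own statement) =====
-- stated objective: alternative
-- what changed: Replaces the positional walk over the two fully sorted sequences (plus a length tiebreak) by a single descending scan over the distinct values, comparing multiplicities of each value; no zip, no length comparison.
import Mathlib
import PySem

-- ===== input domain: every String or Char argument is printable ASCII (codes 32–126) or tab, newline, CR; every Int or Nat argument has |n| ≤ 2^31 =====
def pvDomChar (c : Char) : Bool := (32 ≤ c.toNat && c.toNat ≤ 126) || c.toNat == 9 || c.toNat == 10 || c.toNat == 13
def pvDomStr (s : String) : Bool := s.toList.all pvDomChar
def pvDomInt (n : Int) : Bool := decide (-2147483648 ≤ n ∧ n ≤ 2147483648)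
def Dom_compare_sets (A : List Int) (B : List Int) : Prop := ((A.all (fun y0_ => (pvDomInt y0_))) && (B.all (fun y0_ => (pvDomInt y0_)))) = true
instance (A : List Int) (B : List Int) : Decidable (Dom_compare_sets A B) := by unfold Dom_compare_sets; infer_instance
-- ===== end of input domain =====

-- B compares the multiplicities of each distinct value in descending value order instead of
-- walking the two fully sorted sequences positionally with a length tiebreak (objective: alternative).

-- ===== PORT A =====
-- the 'for a, b in zip(...)' loop with its early returns
def csLoopA : List (Int × Int) → Option Int
  | [] => none
  | (a, b) :: rest => if a < b then some (-1) else if b < a then some 1 else csLoopA rest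

def compare_sets (A : List Int) (B : List Int) : Int :=
  match csLoopA (List.zip (PySem.List.sorted A (fun x => x) false).reverse
                          (PySem.List.sorted B (fun x => x) false).reverse) with
  | some r => r
  | none =>
    if A.length < B.length then -1
    else if B.length < A.length then 1
    else 0

-- ===== PORT B =====
-- the 'for v in sorted(set(A) | set(B), reverse=True)' loop with its early returns
def csLoopB (A : List Int) (B : List Int) : List Int → Int
  | [] => 0
  | v :: rest =>
    if A.count v > B.count v then 1
    else if B.count v > A.count v then -1
    else csLoopB A B rest

def compare_sets_alt (A : List Int) (B : List Int) : Int :=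
  csLoopB A B
    (PySem.List.sorted (PySem.Set.union (PySem.Set.ofList A) (PySem.Set.ofList B)) (fun x => x) true)

-- ===== PRECONDITION & SPEC =====
def Spec_compare_sets (A : List Int) (B : List Int) (out : Int) : Prop := out = compare_sets_alt A B
instance (A : List Int) (B : List Int) (out : Int) : Decidable (Spec_compare_sets A B out) := by unfold Spec_compare_sets; infer_instance

-- ===== CLAIM (what is proved, stated in full; the proofs are below) =====
def Claim_equal_compare_sets : Prop := ∀ (A : List Int) (B : List Int), Dom_compare_sets A B → Spec_compare_sets A B (compare_sets A B)

-- ===== LEMMAS AND PROOFS =====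

-- the common reference: plain lexicographic compare of the two descending-sorted lists,
-- where running out of elements loses
def dcmp : List Int → List Int → Int
  | [], [] => 0
  | [], _ :: _ => -1
  | _ :: _, [] => 1
  | a :: as, b :: bs => if a < b then -1 else if b < a then 1 else dcmp as bs

def dsort (X : List Int) : List Int := (PySem.List.sorted X (fun x => x) false).reverse

-- A's zip loop + length tiebreak computes dcmp
lemma loopA_dcmp (xs ys : List Int) :
    (match csLoopA (List.zip xs ys) with
     | some r => r
     | none =>
       if xs.length < ys.length then -1
       else if ys.length < xs.length then 1
       else 0) = dcmp xs ys := by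
  induction xs generalizing ys with
  | nil => cases ys <;> simp [csLoopA, dcmp]
  | cons a as ih =>
    cases ys with
    | nil => simp [csLoopA, dcmp]
    | cons b bs =>
      by_cases h1 : a < b
      · simp [csLoopA, dcmp, h1]
      · by_cases h2 : b < a
        · simp [csLoopA, dcmp, h1, h2]
        · simpa [csLoopA, dcmp, h1, h2] using ih bs

lemma compare_sets_eq_dcmp (A B : List Int) :
    compare_sets A B = dcmp (dsort A) (dsort B) := by
  have hA : A.length = (dsort A).length := by
    simp [dsort, PySem.List.length_sorted]
  have hB : B.length = (dsort B).length := by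
    simp [dsort, PySem.List.length_sorted]
  rw [compare_sets.eq_def, hA, hB]
  exact loopA_dcmp (dsort A) (dsort B)

lemma mem_dsort (X : List Int) (x : Int) : x ∈ dsort X ↔ x ∈ X := by
  simp [dsort, PySem.List.mem_sorted]

-- splitting off the maximal value: dsort X = v^(count of v) ++ dsort (X without the v's)
lemma dsort_split (X : List Int) (v : Int) (hle : ∀ x ∈ X, x ≤ v) :
    dsort X = List.replicate (X.count v) v ++ dsort (X.filter (fun x => !(x == v))) := by
  have p1 : (PySem.List.sorted (X.filter (fun x => !(x == v))) (fun x => x) false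
      ++ List.replicate (X.count v) v).Perm
      (X.filter (fun x => !(x == v)) ++ List.replicate (X.count v) v) :=
    (PySem.List.sorted_perm _ _ _).append_right _
  have p2 : (X.filter (fun x => !(x == v)) ++ List.replicate (X.count v) v).Perm X := by
    rw [← List.filter_beq (l := X) v]
    exact List.perm_append_comm.trans (List.filter_append_perm _ X)
  have hpair : (PySem.List.sorted (X.filter (fun x => !(x == v))) (fun x => x) false
      ++ List.replicate (X.count v) v).Pairwise (fun a b => a ≤ b) := by
    apply List.pairwise_append.2
    refine ⟨PySem.List.sorted_pairwise _ _, List.pairwise_replicate.2 (Or.inr le_rfl), ?_⟩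
    intro a ha b hb
    have hav : a ∈ X := (List.mem_filter.1 ((PySem.List.mem_sorted _ _ _ _).1 ha)).1
    have hbv : b = v := List.eq_of_mem_replicate hb
    subst hbv
    exact hle a hav
  have key := PySem.List.sorted_id_eq_of_perm_of_pairwise X _ (p1.trans p2) hpair
  unfold dsort
  rw [key, List.reverse_append, List.reverse_replicate]

-- counts over the tail values are unchanged by removing the v's
lemma csLoopB_congr (A A' B B' : List Int) (vs : List Int)
    (h : ∀ u ∈ vs, A.count u = A'.count u ∧ B.count u = B'.count u) :
    csLoopB A B vs = csLoopB A' B' vs := by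
  induction vs with
  | nil => rfl
  | cons v rest ih =>
    have hv := h v (by simp)
    simp only [csLoopB, hv.1, hv.2]
    split_ifs <;> [rfl; rfl; exact ih (fun u hu => h u (by simp [hu]))]

-- dcmp after a common replicate prefix
lemma dcmp_replicate_eq (k : Nat) (xs ys : List Int) (v : Int) :
    dcmp (List.replicate k v ++ xs) (List.replicate k v ++ ys) = dcmp xs ys := by
  induction k with
  | zero => simp
  | succ k ih => simpa [List.replicate_succ, dcmp] using ih

-- left side still holds a v, right side is exhausted or strictly below v
lemma dcmp_head_wins (xs ys : List Int) (v : Int) (hys : ∀ y ∈ ys, y < v) :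
    dcmp (v :: xs) ys = 1 := by
  cases ys with
  | nil => rfl
  | cons y ys' =>
    have hy : y < v := hys y (by simp)
    simp [dcmp, hy, not_lt.2 hy.le]

lemma dcmp_head_loses (xs ys : List Int) (v : Int) (hxs : ∀ x ∈ xs, x < v) :
    dcmp xs (v :: ys) = -1 := by
  cases xs with
  | nil => rfl
  | cons x xs' =>
    have hx : x < v := hxs x (by simp)
    simp [dcmp, hx]

-- main B-side lemma: on a strictly descending value list covering A and B,
-- the count scan computes dcmp of the descending sorts
lemma loopB_dcmp (vs : List Int) (hpw : vs.Pairwise (fun a b => b < a)) :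
    ∀ (A B : List Int), (∀ x ∈ A, x ∈ vs) → (∀ x ∈ B, x ∈ vs) →
      csLoopB A B vs = dcmp (dsort A) (dsort B) := by
  induction vs with
  | nil =>
    intro A B hA hB
    have hA0 : A = [] := List.eq_nil_iff_forall_not_mem.2 (fun x hx => by simpa using hA x hx)
    have hB0 : B = [] := List.eq_nil_iff_forall_not_mem.2 (fun x hx => by simpa using hB x hx)
    subst hA0; subst hB0
    rfl
  | cons v rest ih =>
    intro A B hA hB
    obtain ⟨hv, hrest⟩ := List.pairwise_cons.1 hpw
    have hleA : ∀ x ∈ A, x ≤ v := by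
      intro x hx
      rcases List.mem_cons.1 (hA x hx) with h | h
      · exact h.le
      · exact (hv x h).le
    have hleB : ∀ x ∈ B, x ≤ v := by
      intro x hx
      rcases List.mem_cons.1 (hB x hx) with h | h
      · exact h.le
      · exact (hv x h).le
    have hsA := dsort_split A v hleA
    have hsB := dsort_split B v hleB
    set A' := A.filter (fun x => !(x == v)) with hA'
    set B' := B.filter (fun x => !(x == v)) with hB'
    have hltA' : ∀ x ∈ dsort A', x < v := by
      intro x hx
      have hx' := (mem_dsort _ _).1 hx
      obtain ⟨hxA, hne⟩ := List.mem_filter.1 hx'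
      exact lt_of_le_of_ne (hleA x hxA) (by simpa using hne)
    have hltB' : ∀ x ∈ dsort B', x < v := by
      intro x hx
      have hx' := (mem_dsort _ _).1 hx
      obtain ⟨hxB, hne⟩ := List.mem_filter.1 hx'
      exact lt_of_le_of_ne (hleB x hxB) (by simpa using hne)
    by_cases h1 : A.count v > B.count v
    · have hsplit : A.count v = B.count v + (1 + (A.count v - B.count v - 1)) := by omega
      rw [csLoopB, if_pos h1, hsA, hsB, hsplit, List.replicate_add, List.replicate_add,
        List.append_assoc, List.append_assoc, dcmp_replicate_eq, List.replicate_one,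
        List.singleton_append]
      exact (dcmp_head_wins _ _ v hltB').symm
    · by_cases h2 : B.count v > A.count v
      · have hsplit : B.count v = A.count v + (1 + (B.count v - A.count v - 1)) := by omega
        rw [csLoopB, if_neg h1, if_pos h2, hsA, hsB, hsplit, List.replicate_add,
          List.replicate_add, List.append_assoc, List.append_assoc, dcmp_replicate_eq,
          List.replicate_one, List.singleton_append]
        exact (dcmp_head_loses _ _ v hltA').symm
      · have heq : A.count v = B.count v := by omega
        rw [csLoopB, if_neg h1, if_neg h2, hsA, hsB, heq, dcmp_replicate_eq]
        have hmemA' : ∀ x ∈ A', x ∈ rest := by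
          intro x hx
          obtain ⟨hxA, hne⟩ := List.mem_filter.1 hx
          rcases List.mem_cons.1 (hA x hxA) with h | h
          · exact absurd h (by simpa using hne)
          · exact h
        have hmemB' : ∀ x ∈ B', x ∈ rest := by
          intro x hx
          obtain ⟨hxB, hne⟩ := List.mem_filter.1 hx
          rcases List.mem_cons.1 (hB x hxB) with h | h
          · exact absurd h (by simpa using hne)
          · exact h
        have hcong : csLoopB A B rest = csLoopB A' B' rest := by
          apply csLoopB_congr
          intro u hu
          have hune : u ≠ v := fun h => absurd (h ▸ hv u hu) (lt_irrefl v)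
          constructor
          · exact (List.count_filter (by simpa using hune)).symm
          · exact (List.count_filter (by simpa using hune)).symm
        rw [hcong]
        exact ih hrest A' B' hmemA' hmemB'

theorem alt_eq_dcmp (A B : List Int) :
    compare_sets_alt A B = dcmp (dsort A) (dsort B) := by
  unfold compare_sets_alt
  set vs := PySem.List.sorted (PySem.Set.union (PySem.Set.ofList A) (PySem.Set.ofList B))
    (fun x => x) true with hvs
  have hnd : vs.Nodup := by
    have h1 : (PySem.Set.union (PySem.Set.ofList A) (PySem.Set.ofList B)).Nodup :=
      PySem.Set.nodup_union _ _ (PySem.Set.nodup_ofList _)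
    exact ((PySem.List.sorted_perm _ _ _).nodup_iff).2 h1
  have hpw : vs.Pairwise (fun a b => b < a) := by
    have h1 : vs.Pairwise (fun a b => b ≤ a) := PySem.List.sorted_pairwise_rev _ _
    have h2 : vs.Pairwise (fun a b => a ≠ b) := hnd
    exact (h1.and h2).imp (fun h => lt_of_le_of_ne h.1 (Ne.symm h.2))
  apply loopB_dcmp vs hpw
  · intro x hx
    rw [hvs, PySem.List.mem_sorted]
    exact (PySem.Set.mem_union _ _ _).2 (Or.inl ((PySem.Set.mem_ofList _ _).2 hx))
  · intro x hx
    rw [hvs, PySem.List.mem_sorted]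
    exact (PySem.Set.mem_union _ _ _).2 (Or.inr ((PySem.Set.mem_ofList _ _).2 hx))

-- ===== VERDICT (by name: the statement is the Claim_ definition above) =====
theorem compare_sets_spec : Claim_equal_compare_sets := by
  intro A B _
  unfold Spec_compare_sets
  rw [compare_sets_eq_dcmp, alt_eq_dcmp]
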